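-- pv_equiv track=rewrite | github.com/evandiewald/helium-network-analysis | graph-modeling/get_data.py | get_unique_hex_list
-- ===== SOURCE A (Python) =====
-- def get_unique_hex_list(hotspot_list: list):
--     """Gets list of unique h8 hexes that contain hotspots from list"""
--     unique_hexes = {}
--     for hotspot in hotspot_list:
--         if hotspot['location_hex'] not in unique_hexes.keys():
--             unique_hexes[hotspot['location_hex']] = {}
--             unique_hexes[hotspot['location_hex']]['hotspots'] = [hotspot['address']]
--         else:
--             unique_hexes[hotspot['location_hex']]['hotspots'].append(hotspot['address'])
--     return unique_hexes
-- ===== SOURCE B (Python) =====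
-- def get_unique_hex_list(hotspot_list: list):
--     """Gets list of unique h8 hexes that contain hotspots from list"""
--     hexes = list(dict.fromkeys(h['location_hex'] for h in hotspot_list))
--     return {hex: {'hotspots': [h['address'] for h in hotspot_list
--                                if h['location_hex'] == hex]}
--             for hex in hexes}
-- ===== Notes on version B (the rewrite author's own statement) =====
-- stated objective: alternative
-- what changed: Instead of incrementally growing a nested dict with an in-place append per hotspot, B first deduplicates the location hexes (dict.fromkeys preserves first-occurrence order) and then builds the whole result in one dict comprehension with a per-hex filtering pass.
import Mathlib
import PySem

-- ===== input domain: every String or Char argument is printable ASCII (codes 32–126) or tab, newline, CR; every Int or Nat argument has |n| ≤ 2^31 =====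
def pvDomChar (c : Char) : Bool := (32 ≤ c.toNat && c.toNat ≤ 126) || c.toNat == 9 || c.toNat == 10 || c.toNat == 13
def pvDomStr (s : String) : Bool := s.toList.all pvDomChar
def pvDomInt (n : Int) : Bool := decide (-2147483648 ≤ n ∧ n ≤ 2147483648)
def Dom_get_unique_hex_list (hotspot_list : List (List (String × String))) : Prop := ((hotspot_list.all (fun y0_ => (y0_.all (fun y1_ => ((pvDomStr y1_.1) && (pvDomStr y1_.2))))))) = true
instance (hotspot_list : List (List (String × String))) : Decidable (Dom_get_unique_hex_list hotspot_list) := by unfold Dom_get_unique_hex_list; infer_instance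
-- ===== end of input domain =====

-- B replaces A's incremental nested-dict accumulation by dedup-the-hexes-then-group-per-hex
-- (alternative decomposition, same output; not claimed faster).

-- hotspot[k] for a hotspot dict; total form of the KeyError-raising lookup,
-- exact whenever the key is present (guaranteed by Pre_get_unique_hex_list).
def pvField (h : List (String × String)) (k : String) : String :=
  PySem.Dict.getD (PySem.Dict.mk h) k ""

-- ===== PORT A =====
-- the body of A's for-loop
def pvStepA (d : PySem.Dict String (PySem.Dict String (List String)))
    (h : List (String × String)) : PySem.Dict String (PySem.Dict String (List String)) :=
  if d.contains (pvField h "location_hex") = false then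
    -- unique_hexes[k] = {}; unique_hexes[k]['hotspots'] = [hotspot['address']]
    ((d.insert (pvField h "location_hex") PySem.Dict.empty).modify (pvField h "location_hex")
      PySem.Dict.empty (fun inner => inner.insert "hotspots" [pvField h "address"]))
  else
    -- unique_hexes[k]['hotspots'].append(hotspot['address'])
    d.modify (pvField h "location_hex") PySem.Dict.empty
      (fun inner => inner.modify "hotspots" [] (fun l => l ++ [pvField h "address"]))

def get_unique_hex_list (hotspot_list : List (List (String × String))) : List (String × List (String × List String)) :=
  ((hotspot_list.foldl pvStepA PySem.Dict.empty).items).map (fun p => (p.1, p.2.items))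

-- ===== PORT B =====
def get_unique_hex_list_alt (hotspot_list : List (List (String × String))) : List (String × List (String × List String)) :=
  (PySem.List.dedup (hotspot_list.map (fun h => pvField h "location_hex"))).map
    (fun k => (k, [("hotspots",
      (hotspot_list.filter (fun h => pvField h "location_hex" == k)).map
        (fun h => pvField h "address"))]))

-- ===== PRECONDITION & SPEC =====
-- A raises KeyError on a hotspot missing 'location_hex' or 'address' (B raises there too);
-- exactly those inputs are excluded.
def Pre_get_unique_hex_list (hotspot_list : List (List (String × String))) : Prop :=
  (hotspot_list.all (fun h =>
    h.any (fun p => p.1 == "location_hex") && h.any (fun p => p.1 == "address"))) = true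
instance (hotspot_list : List (List (String × String))) : Decidable (Pre_get_unique_hex_list hotspot_list) := by unfold Pre_get_unique_hex_list; infer_instance
def pvWitness_get_unique_hex_list : (List (List (String × String))) :=
  [[("location_hex", "8c2a"), ("address", "addr1")], [("location_hex", "8c2a"), ("address", "addr2")]]
def Spec_get_unique_hex_list (hotspot_list : List (List (String × String))) (out : List (String × List (String × List String))) : Prop := out = get_unique_hex_list_alt hotspot_list
instance (hotspot_list : List (List (String × String))) (out : List (String × List (String × List String))) : Decidable (Spec_get_unique_hex_list hotspot_list out) := by unfold Spec_get_unique_hex_list; infer_instance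

-- ===== CLAIM (what is proved, stated in full; the proofs are below) =====
def Claim_equal_get_unique_hex_list : Prop := ∀ (hotspot_list : List (List (String × String))), Dom_get_unique_hex_list hotspot_list → Pre_get_unique_hex_list hotspot_list → Spec_get_unique_hex_list hotspot_list (get_unique_hex_list hotspot_list)

-- ===== LEMMAS AND PROOFS =====

def pvKey (h : List (String × String)) : String := pvField h "location_hex"
def pvAddr (h : List (String × String)) : String := pvField h "address"
def pvGrp (hl : List (List (String × String))) (k : String) : List String :=
  (hl.filter (fun h => pvKey h == k)).map pvAddr

theorem pv_dedup_concat {α : Type} [BEq α] [LawfulBEq α] (l : List α) (x : α) :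
    PySem.List.dedup (l ++ [x]) =
      if x ∈ l then PySem.List.dedup l else PySem.List.dedup l ++ [x] := by
  have h1 : PySem.List.dedup (l ++ [x]) = PySem.Set.add (PySem.List.dedup l) x := by
    simp [PySem.List.dedup, PySem.Set.ofList_eq_foldl]
  rw [h1, PySem.Set.add]
  by_cases hx : x ∈ l
  · simp [PySem.Set.contains, hx]
  · simp [PySem.Set.contains, hx]

theorem pv_grp_concat (hl : List (List (String × String))) (h : List (String × String)) (k : String) :
    pvGrp (hl ++ [h]) k = pvGrp hl k ++ (if pvKey h = k then [pvAddr h] else []) := by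
  by_cases hk : pvKey h = k <;>
    simp [pvGrp, List.filter_append, hk]

theorem pv_grp_nil (hl : List (List (String × String))) (k : String)
    (hk : k ∉ hl.map pvKey) : pvGrp hl k = [] := by
  unfold pvGrp
  rw [List.filter_eq_nil_iff.mpr, List.map_nil]
  intro h hm
  have : pvKey h ∈ hl.map pvKey := List.mem_map_of_mem hm
  simp only [beq_iff_eq]
  intro he; exact hk (he ▸ this)

theorem pv_any_map {ν : Type} (s : List String) (g : String → ν) (kh : String) :
    ((s.map (fun k => (k, g k))).any (fun p => p.1 == kh)) = decide (kh ∈ s) := by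
  induction s with
  | nil => simp
  | cons a t ih =>
    by_cases hak : a = kh
    · simp [hak]
    · have hb : (a == kh) = false := beq_eq_false_iff_ne.mpr hak
      simp [ih, hb, Ne.symm hak]

theorem pv_find_map {ν : Type} (s : List String) (g : String → ν) (kh : String)
    (hm : kh ∈ s) :
    List.find? (fun p => p.1 == kh) (s.map (fun k => (k, g k))) = some (kh, g kh) := by
  induction s with
  | nil => simp at hm
  | cons a t ih =>
    by_cases hak : a = kh
    · subst hak; simp
    · have ht : kh ∈ t := by
        rcases List.mem_cons.mp hm with h | h
        · exact absurd h.symm hak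
        · exact h
      simp [hak, ih ht]

theorem pv_find_map_none {ν : Type} (s : List String) (g : String → ν) (kh : String)
    (hm : kh ∉ s) :
    List.find? (fun p => p.1 == kh) (s.map (fun k => (k, g k))) = none := by
  rw [List.find?_eq_none]
  intro p hp
  rcases List.mem_map.mp hp with ⟨k, hk, rfl⟩
  simp only [beq_iff_eq]
  intro he; exact hm (he ▸ hk)

theorem pv_inv (hl : List (List (String × String))) :
    hl.foldl pvStepA PySem.Dict.empty =
      PySem.Dict.mk ((PySem.List.dedup (hl.map pvKey)).map
        (fun k => (k, PySem.Dict.mk [("hotspots", pvGrp hl k)]))) := by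
  induction hl using List.reverseRecOn with
  | nil => rfl
  | append_singleton xs h ih =>
    rw [List.foldl_append, List.foldl_cons, List.foldl_nil, ih]
    set s := PySem.List.dedup (xs.map pvKey) with hs
    set f : String → String × PySem.Dict String (List String) :=
      fun k => (k, PySem.Dict.mk [("hotspots", pvGrp xs k)]) with hf
    have hmem : pvKey h ∈ s ↔ pvKey h ∈ xs.map pvKey := PySem.List.mem_dedup _ _
    have hmapkey : (xs ++ [h]).map pvKey = xs.map pvKey ++ [pvKey h] := by simp
    have hKF : ∀ h', pvField h' "location_hex" = pvKey h' := fun _ => rfl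
    have hAF : ∀ h', pvField h' "address" = pvAddr h' := fun _ => rfl
    rw [pvStepA]
    simp only [hKF, hAF]
    have hcont : (PySem.Dict.mk (s.map f)).contains (pvKey h) = decide (pvKey h ∈ s) := by
      simpa [PySem.Dict.contains, hf] using
        pv_any_map s (fun k => PySem.Dict.mk [("hotspots", pvGrp xs k)]) (pvKey h)
    rw [hmapkey, pv_dedup_concat]
    by_cases hin : pvKey h ∈ s
    · -- key already present: else-branch of the loop body
      rw [if_neg (by simp [hcont, hin]), if_pos (hmem.mp hin)]
      have hget : (PySem.Dict.mk (s.map f)).getD (pvKey h) PySem.Dict.empty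
          = PySem.Dict.mk [("hotspots", pvGrp xs (pvKey h))] := by
        simp [PySem.Dict.getD, PySem.Dict.get?, hf, pv_find_map s _ (pvKey h) hin]
      rw [PySem.Dict.modify, hget]
      have hF : ∀ G : List String,
          (PySem.Dict.mk [("hotspots", G)]).modify "hotspots" [] (fun l => l ++ [pvAddr h])
            = PySem.Dict.mk [("hotspots", G ++ [pvAddr h])] := by
        intro G
        simp [PySem.Dict.modify, PySem.Dict.insert, PySem.Dict.contains,
          PySem.Dict.getD, PySem.Dict.get?]
      rw [hF]
      rw [PySem.Dict.insert, if_pos (by simp [hcont, hin])]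
      simp only [List.map_map]
      congr 1
      apply List.map_congr_left
      intro k hk
      by_cases hkk : k = pvKey h
      · simp [Function.comp, hf, hkk, pv_grp_concat]
      · simp [Function.comp, hf, hkk, pv_grp_concat,
          show ¬ pvKey h = k from fun e => hkk e.symm]
    · -- fresh key: then-branch of the loop body
      rw [if_pos (by simp [hcont, hin]), if_neg (fun hmm => hin (hmem.mpr hmm))]
      rw [PySem.Dict.insert, if_neg (by simp [hcont, hin])]
      have hget1 : (PySem.Dict.mk (s.map f ++ [(pvKey h, PySem.Dict.empty)])).getD (pvKey h)
          PySem.Dict.empty = PySem.Dict.empty := by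
        simp [PySem.Dict.getD, PySem.Dict.get?, List.find?_append, hf,
          pv_find_map_none s _ (pvKey h) hin]
      rw [PySem.Dict.modify, hget1]
      have hF0 : PySem.Dict.empty.insert "hotspots" [pvAddr h]
          = PySem.Dict.mk [("hotspots", [pvAddr h])] := by
        simp [PySem.Dict.insert, PySem.Dict.contains, PySem.Dict.empty]
      rw [hF0]
      have hc1 : (PySem.Dict.mk (s.map f ++ [(pvKey h, PySem.Dict.empty)])).contains (pvKey h)
          = true := by
        simp [PySem.Dict.contains]
      rw [PySem.Dict.insert, if_pos hc1]
      have hrep : (s.map ((fun p => if (p.1 == pvKey h) = true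
            then (pvKey h, PySem.Dict.mk [("hotspots", [pvAddr h])]) else p) ∘ f)) = s.map f := by
        apply List.map_congr_left
        intro k hk
        have : ¬ k = pvKey h := fun e => hin (e ▸ hk)
        simp [Function.comp, hf, this]
      have hsame : s.map (fun k => (k, PySem.Dict.mk [("hotspots", pvGrp (xs ++ [h]) k)]))
          = s.map f := by
        apply List.map_congr_left
        intro k hk
        have : ¬ pvKey h = k := fun e => hin (e ▸ hk)
        simp [hf, pv_grp_concat, this]
      congr 1
      rw [List.map_append, List.map_map, hrep, List.map_append, hsame]
      simp [hf, pv_grp_concat, pv_grp_nil xs (pvKey h) (fun m => hin (hmem.mpr m))]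

-- ===== VERDICT (by name: the statement is the Claim_ definition above) =====
theorem get_unique_hex_list_spec : Claim_equal_get_unique_hex_list := by
  intro hl _ _
  unfold Spec_get_unique_hex_list get_unique_hex_list get_unique_hex_list_alt
  rw [pv_inv]
  simp only [pvKey, pvGrp, List.map_map]
  rfl
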